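-- pv_equiv track=rewrite | github.com/henrynnovate/Functions | Check_Append.py | check
-- ===== SOURCE A (Python) =====
-- def check(set_of_values, what_are_you_looking_for):
--     result = []
--     split_result = []
--     for value in set_of_values:
--         if what_are_you_looking_for not in value:
--             result.append(value)
--         elif what_are_you_looking_for in value:
--             splitted_value = value.split(',')
--             split_result.append(splitted_value)
--             for sp_value in split_result:
--                 joined_value =''.join(sp_value[0:])
--             result.append(joined_value)
--     return result
-- ===== SOURCE B (Python) =====
-- def check(set_of_values, what_are_you_looking_for):
--     return [value.replace(',', '') if what_are_you_looking_for in value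
--             else value
--             for value in set_of_values]
-- ===== Notes on version B (the rewrite author's own statement) =====
-- stated objective: simpler
-- what changed: Removed the inner rescan of the accumulated split_result list (whose result only ever depends on its last element) and the split_result accumulator itself: a single comprehension that maps each matching value to value.replace(',', '').
import Mathlib
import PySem

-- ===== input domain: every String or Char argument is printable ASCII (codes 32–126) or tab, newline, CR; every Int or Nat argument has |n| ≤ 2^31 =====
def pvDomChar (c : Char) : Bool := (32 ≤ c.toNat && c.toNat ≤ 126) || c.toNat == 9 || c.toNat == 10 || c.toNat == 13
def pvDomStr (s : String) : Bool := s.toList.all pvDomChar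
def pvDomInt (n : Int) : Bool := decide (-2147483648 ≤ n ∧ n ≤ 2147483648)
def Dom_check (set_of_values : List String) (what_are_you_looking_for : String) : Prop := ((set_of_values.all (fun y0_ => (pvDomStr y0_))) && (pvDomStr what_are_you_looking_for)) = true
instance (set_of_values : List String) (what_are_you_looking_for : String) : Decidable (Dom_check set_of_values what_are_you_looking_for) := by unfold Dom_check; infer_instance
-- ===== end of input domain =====

-- B drops A's inner rescan of the accumulated split_result (only its last element ever matters)
-- and the accumulator itself, mapping each matching value directly to value.replace(',', '').

-- ===== PORT A =====
-- state: (result, split_result, joined_value); the `elif` test is the exact negation of the `if`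
-- test, so it is ported as a plain else; split? is always `some` (separator "," is non-empty),
-- so `.getD []` is exact; joined_value starts at "" but is always overwritten before being read
-- (the inner loop runs over the non-empty split_result).
def check (set_of_values : List String) (what_are_you_looking_for : String) : List String :=
  (set_of_values.foldl (fun st value =>
      if PySem.Str.isIn what_are_you_looking_for value = false then
        (st.1 ++ [value], st.2.1, st.2.2)
      else
        let splitted_value := (PySem.Str.split? value ",").getD []
        let split_result' := st.2.1 ++ [splitted_value]
        let joined_value := split_result'.foldl
          (fun _ sp_value => PySem.Str.join "" (PySem.List.slice sp_value (some 0) none)) st.2.2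
        (st.1 ++ [joined_value], split_result', joined_value))
    (([] : List String), ([] : List (List String)), "")).1

-- ===== PORT B =====
def check_alt (set_of_values : List String) (what_are_you_looking_for : String) : List String :=
  set_of_values.map (fun value =>
    if PySem.Str.isIn what_are_you_looking_for value then PySem.Str.replace value "," "" else value)

-- ===== PRECONDITION & SPEC =====
def Spec_check (set_of_values : List String) (what_are_you_looking_for : String) (out : List String) : Prop := out = check_alt set_of_values what_are_you_looking_for
instance (set_of_values : List String) (what_are_you_looking_for : String) (out : List String) : Decidable (Spec_check set_of_values what_are_you_looking_for out) := by unfold Spec_check; infer_instance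

-- ===== CLAIM (what is proved, stated in full; the proofs are below) =====
def Claim_equal_check : Prop := ∀ (set_of_values : List String) (what_are_you_looking_for : String), Dom_check set_of_values what_are_you_looking_for → Spec_check set_of_values what_are_you_looking_for (check set_of_values what_are_you_looking_for)

-- ===== LEMMAS AND PROOFS =====

-- replace.go: the accumulator only prefixes (reversed) the result
theorem repl_go_acc (old new : List Char) :
    ∀ (fuel : Nat) (l acc : List Char),
      PySem.Chars.replace.go old new fuel l acc
        = acc.reverse ++ PySem.Chars.replace.go old new fuel l [] := by
  intro fuel
  induction fuel with
  | zero => intro l acc; simp [PySem.Chars.replace.go]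
  | succ fuel ih =>
    intro l acc
    cases l with
    | nil => simp [PySem.Chars.replace.go]
    | cons c t =>
      simp only [PySem.Chars.replace.go]
      split_ifs with h
      · rw [ih _ (new.reverse ++ acc), ih _ (new.reverse ++ [])]
        simp
      · rw [ih t (c :: acc), ih t (c :: [])]
        simp

-- replace.go with a single-char old pattern: any fuel ≥ |l| gives the canonical result
theorem repl_go_fuel :
    ∀ (fuel : Nat) (l acc : List Char), l.length ≤ fuel →
      PySem.Chars.replace.go [','] [] fuel l acc
        = PySem.Chars.replace.go [','] [] l.length l acc := by
  intro fuel
  induction fuel with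
  | zero =>
    intro l acc h
    have : l = [] := List.eq_nil_of_length_eq_zero (Nat.le_zero.mp h)
    subst this; rfl
  | succ fuel ih =>
    intro l acc h
    cases l with
    | nil => simp [PySem.Chars.replace.go]
    | cons c t =>
      simp only [List.length_cons] at h ⊢
      simp only [PySem.Chars.replace.go]
      split_ifs with hp
      · have hd : List.drop [','].length (c :: t) = t := by simp
        rw [hd, ih t _ (Nat.lt_succ_iff.mp (Nat.lt_of_lt_of_le (Nat.lt_succ_self _) h))]
      · exact ih t _ (Nat.succ_le_succ_iff.mp h)

-- the flatten of splitOn.go's pieces is replace.go with an empty replacement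
theorem splitOn_go_flatten :
    ∀ (fuel : Nat) (l cur : List Char) (acc : List (List Char)),
      (PySem.Chars.splitOn.go [','] fuel l cur acc).flatten
        = acc.reverse.flatten ++ cur.reverse ++ PySem.Chars.replace.go [','] [] fuel l [] := by
  intro fuel
  induction fuel with
  | zero => intro l cur acc; simp [PySem.Chars.splitOn.go, PySem.Chars.replace.go]
  | succ fuel ih =>
    intro l cur acc
    cases l with
    | nil => simp [PySem.Chars.splitOn.go, PySem.Chars.replace.go]
    | cons c t =>
      simp only [PySem.Chars.splitOn.go, PySem.Chars.replace.go]
      split_ifs with h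
      · rw [ih]
        simp
      · rw [ih, repl_go_acc [','] [] fuel t [c]]
        simp

-- "".join over any parts list is its flatten
theorem join_nil_eq_flatten : ∀ (parts : List (List Char)),
    PySem.Chars.join [] parts = parts.flatten := by
  intro parts
  induction parts with
  | nil => simp [PySem.Chars.join_nil]
  | cons p rest ih =>
    cases rest with
    | nil => simp [PySem.Chars.join_singleton]
    | cons q rest' =>
      rw [PySem.Chars.join_cons_cons, ih]
      simp

-- ''.join(value.split(',')) = value.replace(',', '')
theorem join_split_eq_replace (value : String) :
    PySem.Str.join "" ((PySem.Str.split? value ",").getD [])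
      = PySem.Str.replace value "," "" := by
  apply String.toList_inj.mp
  rw [PySem.Str.toList_join, PySem.Str.toList_replace]
  have hsp : PySem.Str.split? value ","
      = some ((PySem.Chars.splitOn value.toList [',']).map String.ofList) := by
    simp [PySem.Str.split?, PySem.Chars.split?]
  rw [hsp]
  have h0 : ("" : String).toList = ([] : List Char) := rfl
  have h1 : ("," : String).toList = ([','] : List Char) := rfl
  have hmap2 : List.map String.toList (List.map String.ofList
      (PySem.Chars.splitOn value.toList [','])) = PySem.Chars.splitOn value.toList [','] := by
    simp [Function.comp_def, String.toList_ofList]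
  simp only [Option.getD_some]
  rw [h0, h1, hmap2, join_nil_eq_flatten]
  have hrepl : PySem.Chars.replace value.toList [','] []
      = PySem.Chars.replace.go [','] [] value.toList.length value.toList [] := by
    simp [PySem.Chars.replace]
  rw [hrepl, PySem.Chars.splitOn, splitOn_go_flatten,
      repl_go_fuel (value.toList.length + 1) value.toList [] (Nat.le_succ _)]
  simp

-- the inner foldl over split_result ++ [splitted] returns "".join(splitted)
theorem inner_foldl (l : List (List String)) (j : String) (x : List String) :
    (l ++ [x]).foldl
        (fun _ sp_value => PySem.Str.join "" (PySem.List.slice sp_value (some 0) none)) j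
      = PySem.Str.join "" x := by
  rw [List.foldl_append]
  simp [PySem.List.slice_zero_start, PySem.List.slice_none_none]

-- loop invariant: the result component accumulates the per-element images
theorem check_loop (w : String) :
    ∀ (vals : List String) (result : List String) (sr : List (List String)) (j : String),
      (vals.foldl (fun st value =>
          if PySem.Str.isIn w value = false then
            (st.1 ++ [value], st.2.1, st.2.2)
          else
            let splitted_value := (PySem.Str.split? value ",").getD []
            let split_result' := st.2.1 ++ [splitted_value]
            let joined_value := split_result'.foldl
              (fun _ sp_value => PySem.Str.join "" (PySem.List.slice sp_value (some 0) none)) st.2.2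
            (st.1 ++ [joined_value], split_result', joined_value))
        (result, sr, j)).1
      = result ++ vals.map (fun value =>
          if PySem.Str.isIn w value then PySem.Str.replace value "," "" else value) := by
  intro vals
  induction vals with
  | nil => intro result sr j; simp
  | cons v t ih =>
    intro result sr j
    simp only [List.foldl_cons, List.map_cons]
    by_cases hv : PySem.Str.isIn w v = false
    · rw [if_pos hv, ih, hv]
      simp
    · rw [if_neg hv]
      simp only at hv
      have hv' : PySem.Str.isIn w v = true := by
        cases h : PySem.Str.isIn w v
        · exact absurd h hv
        · rfl
      simp only [hv', if_true]
      rw [ih, inner_foldl, join_split_eq_replace]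
      simp

-- ===== VERDICT (by name: the statement is the Claim_ definition above) =====
theorem check_spec : Claim_equal_check := by
  intro set_of_values what_are_you_looking_for _
  unfold Spec_check check check_alt
  rw [check_loop]
  simp
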